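-- pv_equiv track=rewrite | github.com/hxwvaa/codingame_winter | codingame_winter/z2.py | get_spore_position_in_direction
-- ===== SOURCE A (Python) =====
-- def get_spore_position_in_direction(direction, sporer_pos, occupied_positions, width, height):
--     sx, sy = sporer_pos
--
--     # Generate positions based on the given direction
--     if direction == 'N':
--         positions = [(sx, y) for y in range(sy - 1, -1, -1)]
--     elif direction == 'S':
--         positions = [(sx, y) for y in range(sy + 1, height)]
--     elif direction == 'E':
--         positions = [(x, sy) for x in range(sx + 1, width)]
--     elif direction == 'W':
--         positions = [(x, sy) for x in range(sx - 1, -1, -1)]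
--     else:
--         raise ValueError("Invalid direction. Use 'N', 'S', 'E', or 'W'.")
--
--     # Find the position 1 block before the first occupied position or boundary
--     for i, pos in enumerate(positions):
--         if pos in occupied_positions:
--             # Return the position before the occupied block
--             return positions[i - 1] if i > 0 else None
--
--     # If no occupied position is found, return the last position in the direction
--     return positions[-1] if positions else None
-- ===== SOURCE B (Python) =====
-- def get_spore_position_in_direction(direction, sporer_pos, occupied_positions, width, height):
--     sx, sy = sporer_pos
--     # Arithmetic re-formulation: instead of walking the ray cell by cell, scan the
--     # obstacle list once for blockers lying on the ray and compute the answer from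
--     # the nearest blocker (or from the board border when there is none).
--     if direction == 'N':
--         blockers = [y for (x, y) in occupied_positions if x == sx and 0 <= y < sy]
--         if blockers:
--             y0 = max(blockers)
--             return (sx, y0 + 1) if y0 + 1 < sy else None
--         return (sx, 0) if sy >= 1 else None
--     if direction == 'S':
--         blockers = [y for (x, y) in occupied_positions if x == sx and sy < y < height]
--         if blockers:
--             y0 = min(blockers)
--             return (sx, y0 - 1) if sy + 1 < y0 else None
--         return (sx, height - 1) if sy + 1 < height else None
--     if direction == 'E':
--         blockers = [x for (x, y) in occupied_positions if y == sy and sx < x < width]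
--         if blockers:
--             x0 = min(blockers)
--             return (x0 - 1, sy) if sx + 1 < x0 else None
--         return (width - 1, sy) if sx + 1 < width else None
--     if direction == 'W':
--         blockers = [x for (x, y) in occupied_positions if y == sy and 0 <= x < sx]
--         if blockers:
--             x0 = max(blockers)
--             return (x0 + 1, sy) if x0 + 1 < sx else None
--         return (0, sy) if sx >= 1 else None
--     raise ValueError("Invalid direction. Use 'N', 'S', 'E', or 'W'.")
-- ===== Notes on version B (the rewrite author's own statement) =====
-- stated objective: faster
-- what changed: B drops A's materialised ray and cell-by-cell scan entirely: it filters the obstacle list once for blockers lying on the ray and computes the answer arithmetically from the nearest blocker (min/max) or from the board border.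
import Mathlib
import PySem

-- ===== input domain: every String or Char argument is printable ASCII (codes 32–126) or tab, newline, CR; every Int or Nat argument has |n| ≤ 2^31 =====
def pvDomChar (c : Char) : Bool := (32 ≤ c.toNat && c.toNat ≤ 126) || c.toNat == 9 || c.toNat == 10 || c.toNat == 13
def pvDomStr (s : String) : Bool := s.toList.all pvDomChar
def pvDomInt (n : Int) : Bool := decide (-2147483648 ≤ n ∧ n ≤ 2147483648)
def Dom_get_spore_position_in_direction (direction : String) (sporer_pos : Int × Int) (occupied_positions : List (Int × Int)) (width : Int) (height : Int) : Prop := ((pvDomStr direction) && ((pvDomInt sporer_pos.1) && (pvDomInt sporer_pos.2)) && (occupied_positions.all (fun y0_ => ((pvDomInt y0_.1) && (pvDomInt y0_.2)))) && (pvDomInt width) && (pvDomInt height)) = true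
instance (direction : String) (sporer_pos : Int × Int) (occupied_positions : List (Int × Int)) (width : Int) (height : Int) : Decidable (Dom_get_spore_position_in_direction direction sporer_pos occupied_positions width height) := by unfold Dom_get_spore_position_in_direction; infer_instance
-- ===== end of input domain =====

-- B replaces A's cell-by-cell ray walk with one pass over the obstacle list,
-- taking the nearest on-ray blocker (or the border) arithmetically: faster by algorithm.


-- ===== PORT A =====
-- A's loop over enumerate(positions), indexing back into the full list.
def pvScanA (occ L : List (Int × Int)) : List (Int × (Int × Int)) → Option (Int × Int)
  | [] => if L = [] then none else PySem.List.pyGet? L (-1)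
  | (i, pos) :: rest =>
    if pos ∈ occ then (if i > 0 then PySem.List.pyGet? L (i - 1) else none)
    else pvScanA occ L rest

def get_spore_position_in_direction (direction : String) (sporer_pos : Int × Int) (occupied_positions : List (Int × Int)) (width : Int) (height : Int) : Option (Int × Int) :=
  let sx := sporer_pos.1
  let sy := sporer_pos.2
  if direction = "N" then
    let positions := (PySem.List.pyRange (sy - 1) (-1) (-1)).map (fun y => (sx, y))
    pvScanA occupied_positions positions (PySem.List.enumerate positions)
  else if direction = "S" then
    let positions := (PySem.List.pyRange (sy + 1) height 1).map (fun y => (sx, y))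
    pvScanA occupied_positions positions (PySem.List.enumerate positions)
  else if direction = "E" then
    let positions := (PySem.List.pyRange (sx + 1) width 1).map (fun x => (x, sy))
    pvScanA occupied_positions positions (PySem.List.enumerate positions)
  else if direction = "W" then
    let positions := (PySem.List.pyRange (sx - 1) (-1) (-1)).map (fun x => (x, sy))
    pvScanA occupied_positions positions (PySem.List.enumerate positions)
  else
    none  -- Python raises ValueError here; excluded by Pre_

-- ===== PORT B =====
-- One filter over the obstacle list per direction, then min/max of the blockers.
def get_spore_position_in_direction_alt (direction : String) (sporer_pos : Int × Int) (occupied_positions : List (Int × Int)) (width : Int) (height : Int) : Option (Int × Int) :=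
  let sx := sporer_pos.1
  let sy := sporer_pos.2
  if direction = "N" then
    let blockers := (occupied_positions.filter (fun p => decide (p.1 = sx ∧ 0 ≤ p.2 ∧ p.2 < sy))).map Prod.snd
    match blockers.max? with
    | some y0 => if y0 + 1 < sy then some (sx, y0 + 1) else none
    | none => if 1 ≤ sy then some (sx, 0) else none
  else if direction = "S" then
    let blockers := (occupied_positions.filter (fun p => decide (p.1 = sx ∧ sy < p.2 ∧ p.2 < height))).map Prod.snd
    match blockers.min? with
    | some y0 => if sy + 1 < y0 then some (sx, y0 - 1) else none
    | none => if sy + 1 < height then some (sx, height - 1) else none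
  else if direction = "E" then
    let blockers := (occupied_positions.filter (fun p => decide (p.2 = sy ∧ sx < p.1 ∧ p.1 < width))).map Prod.fst
    match blockers.min? with
    | some x0 => if sx + 1 < x0 then some (x0 - 1, sy) else none
    | none => if sx + 1 < width then some (width - 1, sy) else none
  else if direction = "W" then
    let blockers := (occupied_positions.filter (fun p => decide (p.2 = sy ∧ 0 ≤ p.1 ∧ p.1 < sx))).map Prod.fst
    match blockers.max? with
    | some x0 => if x0 + 1 < sx then some (x0 + 1, sy) else none
    | none => if 1 ≤ sx then some (0, sy) else none
  else
    none  -- Python raises ValueError here; excluded by Pre_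

-- ===== PRECONDITION & SPEC =====
-- Pre_ excludes only the inputs on which A raises ValueError (direction not one of N/S/E/W).
def Pre_get_spore_position_in_direction (direction : String) (sporer_pos : Int × Int) (occupied_positions : List (Int × Int)) (width : Int) (height : Int) : Prop :=
  direction = "N" ∨ direction = "S" ∨ direction = "E" ∨ direction = "W"
instance (direction : String) (sporer_pos : Int × Int) (occupied_positions : List (Int × Int)) (width : Int) (height : Int) : Decidable (Pre_get_spore_position_in_direction direction sporer_pos occupied_positions width height) := by unfold Pre_get_spore_position_in_direction; infer_instance

def pvWitness_get_spore_position_in_direction : String × (Int × Int) × (List (Int × Int)) × Int × Int := ("N", (1, 1), [(0, 0)], 3, 3)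

def Spec_get_spore_position_in_direction (direction : String) (sporer_pos : Int × Int) (occupied_positions : List (Int × Int)) (width : Int) (height : Int) (out : Option (Int × Int)) : Prop := out = get_spore_position_in_direction_alt direction sporer_pos occupied_positions width height
instance (direction : String) (sporer_pos : Int × Int) (occupied_positions : List (Int × Int)) (width : Int) (height : Int) (out : Option (Int × Int)) : Decidable (Spec_get_spore_position_in_direction direction sporer_pos occupied_positions width height out) := by unfold Spec_get_spore_position_in_direction; infer_instance

-- ===== CLAIM (what is proved, stated in full; the proofs are below) =====
def Claim_equal_get_spore_position_in_direction : Prop := ∀ (direction : String) (sporer_pos : Int × Int) (occupied_positions : List (Int × Int)) (width : Int) (height : Int), Dom_get_spore_position_in_direction direction sporer_pos occupied_positions width height → Pre_get_spore_position_in_direction direction sporer_pos occupied_positions width height → Spec_get_spore_position_in_direction direction sporer_pos occupied_positions width height (get_spore_position_in_direction direction sporer_pos occupied_positions width height)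

-- ===== LEMMAS AND PROOFS =====
-- Reference loop: scan a list of cells keeping the previous free cell.
def pvWalkL (occ : List (Int × Int)) : List (Int × Int) → Option (Int × Int) → Option (Int × Int)
  | [], prev => prev
  | p :: rest, prev => if p ∈ occ then prev else pvWalkL occ rest (some p)

lemma pvGet_neg_one (xs : List (Int × Int)) (h : xs ≠ []) :
    PySem.List.pyGet? xs (-1) = xs.getLast? := by
  have hl : 1 ≤ xs.length := List.length_pos_of_ne_nil h
  simp only [PySem.List.pyGet?, PySem.List.pyIdx?, Int.reduceNeg, Int.neg_nonneg, Int.reduceLE,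
    ↓reduceIte, neg_le_neg_iff, Nat.one_le_cast, neg_neg, Int.toNat_one, hl,
    Option.bind_some]
  rw [List.getLast?_eq_getElem?]

-- A's indexed scan over enumerate(positions) is the previous-free-cell loop.
lemma pvScanA_eq_walkL (occ : List (Int × Int)) :
    ∀ (tail pre : List (Int × Int)),
      pvScanA occ (pre ++ tail) (PySem.List.enumerate tail (pre.length : Int)) =
      pvWalkL occ tail pre.getLast? := by
  intro tail
  induction tail with
  | nil =>
    intro pre
    simp only [PySem.List.enumerate_nil, List.append_nil, pvScanA, pvWalkL]
    by_cases hpre : pre = []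
    · simp [hpre]
    · rw [if_neg hpre, pvGet_neg_one pre hpre]
  | cons p rest ih =>
    intro pre
    rw [PySem.List.enumerate_cons]
    simp only [pvScanA, pvWalkL]
    by_cases hocc : p ∈ occ
    · rw [if_pos hocc, if_pos hocc]
      cases pre with
      | nil => simp
      | cons q qs =>
        have hlen : (0:Int) < ((q :: qs).length : Int) := by simp
        rw [if_pos hlen]
        have hcast : ((q :: qs).length : Int) - 1 = (((q :: qs).length - 1 : Nat) : Int) := by
          push_cast [List.length_cons]; ring
        rw [hcast, PySem.List.pyGet?_ofNat _ _
          (by simp only [List.length_cons, List.length_append]; omega)]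
        rw [List.getElem_append_left (by simp only [List.length_cons]; omega)]
        rw [List.getLast?_eq_getElem?,
          List.getElem?_eq_getElem (by simp only [List.length_cons]; omega)]
    · rw [if_neg hocc, if_neg hocc]
      have h := ih (pre ++ [p])
      simp only [List.append_assoc, List.singleton_append, List.length_append,
        List.getLast?_concat, Nat.cast_add, Nat.cast_one,
        List.length_cons, List.length_nil, Nat.zero_add] at h
      exact h

-- Walking an increasing ray mk(a), mk(a+1), …, mk(a+n-1) equals the min of the blockers.
lemma pvWalk_inc (occ : List (Int × Int)) (mk : Int → Int × Int) :
    ∀ (n : Nat) (a : Int) (prev : Option (Int × Int)) (c : List Int),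
      (∀ v, v ∈ c ↔ (mk v ∈ occ ∧ a ≤ v ∧ v < a + n)) →
      pvWalkL occ ((List.range n).map (fun k : Nat => mk (a + (k : Int)))) prev =
        (match c.min? with
         | some v0 => if a < v0 then some (mk (v0 - 1)) else prev
         | none => if n = 0 then prev else some (mk (a + n - 1))) := by
  intro n
  induction n with
  | zero =>
    intro a prev c hc
    have hcnil : c = [] := by
      apply List.eq_nil_iff_forall_not_mem.mpr
      intro v hv
      have := (hc v).mp hv
      omega
    simp [hcnil, pvWalkL]
  | succ m ih =>
    intro a prev c hc
    rw [List.range_succ_eq_map]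
    simp only [List.map_cons, List.map_map, Nat.cast_zero, add_zero, pvWalkL]
    by_cases hmem : mk a ∈ occ
    · rw [if_pos hmem]
      have hmin : c.min? = some a := by
        rw [List.min?_eq_some_iff]
        refine ⟨(hc a).mpr ⟨hmem, le_refl a, by omega⟩, fun b hb => ?_⟩
        have := (hc b).mp hb
        omega
      rw [hmin]
      simp
    · rw [if_neg hmem]
      have hray : (List.range m).map ((fun k : Nat => mk (a + (k : Int))) ∘ Nat.succ)
          = (List.range m).map (fun k : Nat => mk ((a + 1) + (k : Int))) := by
        apply List.map_congr_left
        intro k _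
        simp only [Function.comp_apply]
        congr 1
        push_cast
        ring
      rw [hray, ih (a + 1) (some (mk a)) c ?hc']
      case hc' =>
        intro v
        rw [hc v]
        constructor
        · rintro ⟨h1, h2, h3⟩
          refine ⟨h1, ?_, by omega⟩
          rcases lt_or_eq_of_le h2 with h | h
          · omega
          · exact absurd (h ▸ h1) hmem
        · rintro ⟨h1, h2, h3⟩
          exact ⟨h1, by omega, by omega⟩
      cases hm : c.min? with
      | none =>
        simp only
        by_cases hm0 : m = 0
        · subst hm0; simp
        · rw [if_neg hm0, if_neg (by omega : ¬ m + 1 = 0)]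
          congr 1
          push_cast
          ring_nf
      | some v0 =>
        have hv0 : mk v0 ∈ occ ∧ a ≤ v0 ∧ v0 < a + (m + 1 : Nat) :=
          (hc v0).mp ((List.min?_eq_some_iff.mp hm).1)
        have hne : v0 ≠ a := fun h => hmem (h ▸ hv0.1)
        simp only
        rw [if_pos (by omega : a < v0)]
        by_cases hgt : a + 1 < v0
        · rw [if_pos hgt]
        · rw [if_neg hgt]
          have : v0 = a + 1 := by omega
          rw [this]
          norm_num

-- Walking a decreasing ray mk(a), mk(a-1), …, mk(a-n+1) equals the max of the blockers.
lemma pvWalk_dec (occ : List (Int × Int)) (mk : Int → Int × Int) :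
    ∀ (n : Nat) (a : Int) (prev : Option (Int × Int)) (c : List Int),
      (∀ v, v ∈ c ↔ (mk v ∈ occ ∧ a - n < v ∧ v ≤ a)) →
      pvWalkL occ ((List.range n).map (fun k : Nat => mk (a - (k : Int)))) prev =
        (match c.max? with
         | some v0 => if v0 < a then some (mk (v0 + 1)) else prev
         | none => if n = 0 then prev else some (mk (a - n + 1))) := by
  intro n
  induction n with
  | zero =>
    intro a prev c hc
    have hcnil : c = [] := by
      apply List.eq_nil_iff_forall_not_mem.mpr
      intro v hv
      have := (hc v).mp hv
      omega
    simp [hcnil, pvWalkL]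
  | succ m ih =>
    intro a prev c hc
    rw [List.range_succ_eq_map]
    simp only [List.map_cons, List.map_map, Nat.cast_zero, sub_zero, pvWalkL]
    by_cases hmem : mk a ∈ occ
    · rw [if_pos hmem]
      have hmax : c.max? = some a := by
        rw [List.max?_eq_some_iff]
        refine ⟨(hc a).mpr ⟨hmem, by omega, le_refl a⟩, fun b hb => ?_⟩
        have := (hc b).mp hb
        omega
      rw [hmax]
      simp
    · rw [if_neg hmem]
      have hray : (List.range m).map ((fun k : Nat => mk (a - (k : Int))) ∘ Nat.succ)
          = (List.range m).map (fun k : Nat => mk ((a - 1) - (k : Int))) := by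
        apply List.map_congr_left
        intro k _
        simp only [Function.comp_apply]
        congr 1
        push_cast
        ring
      rw [hray, ih (a - 1) (some (mk a)) c ?hc']
      case hc' =>
        intro v
        rw [hc v]
        constructor
        · rintro ⟨h1, h2, h3⟩
          refine ⟨h1, by omega, ?_⟩
          rcases lt_or_eq_of_le h3 with h | h
          · omega
          · exact absurd (h ▸ h1) hmem
        · rintro ⟨h1, h2, h3⟩
          exact ⟨h1, by omega, by omega⟩
      cases hm : c.max? with
      | none =>
        simp only
        by_cases hm0 : m = 0
        · subst hm0; simp
        · rw [if_neg hm0, if_neg (by omega : ¬ m + 1 = 0)]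
          congr 1
          push_cast
          ring_nf
      | some v0 =>
        have hv0 : mk v0 ∈ occ ∧ a - (m + 1 : Nat) < v0 ∧ v0 ≤ a :=
          (hc v0).mp ((List.max?_eq_some_iff.mp hm).1)
        have hne : v0 ≠ a := fun h => hmem (h ▸ hv0.1)
        simp only
        rw [if_pos (by omega : v0 < a)]
        by_cases hlt : v0 < a - 1
        · rw [if_pos hlt]
        · rw [if_neg hlt]
          have : v0 = a - 1 := by omega
          rw [this]
          norm_num

-- Blocker-list membership characterisations, one per direction.
lemma pvMem_S (occ : List (Int × Int)) (sx sy height v : Int) :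
    v ∈ (occ.filter (fun p => decide (p.1 = sx ∧ sy < p.2 ∧ p.2 < height))).map Prod.snd ↔
      ((sx, v) ∈ occ ∧ sy + 1 ≤ v ∧ v < (sy + 1) + ((height - (sy + 1)).toNat : Int)) := by
  simp only [List.mem_map, List.mem_filter, decide_eq_true_eq]
  constructor
  · rintro ⟨⟨px, py⟩, ⟨hp, h1, h2, h3⟩, rfl⟩
    simp only at h1 h2 h3 ⊢
    subst h1
    exact ⟨hp, by omega, by omega⟩
  · rintro ⟨hmem, h1, h2⟩
    exact ⟨(sx, v), ⟨hmem, rfl, by omega, by omega⟩, rfl⟩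

lemma pvMem_E (occ : List (Int × Int)) (sx sy width v : Int) :
    v ∈ (occ.filter (fun p => decide (p.2 = sy ∧ sx < p.1 ∧ p.1 < width))).map Prod.fst ↔
      ((v, sy) ∈ occ ∧ sx + 1 ≤ v ∧ v < (sx + 1) + ((width - (sx + 1)).toNat : Int)) := by
  simp only [List.mem_map, List.mem_filter, decide_eq_true_eq]
  constructor
  · rintro ⟨⟨px, py⟩, ⟨hp, h1, h2, h3⟩, rfl⟩
    simp only at h1 h2 h3 ⊢
    subst h1
    exact ⟨hp, by omega, by omega⟩
  · rintro ⟨hmem, h1, h2⟩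
    exact ⟨(v, sy), ⟨hmem, rfl, by omega, by omega⟩, rfl⟩

lemma pvMem_N (occ : List (Int × Int)) (sx sy v : Int) :
    v ∈ (occ.filter (fun p => decide (p.1 = sx ∧ 0 ≤ p.2 ∧ p.2 < sy))).map Prod.snd ↔
      ((sx, v) ∈ occ ∧ (sy - 1) - (sy.toNat : Int) < v ∧ v ≤ sy - 1) := by
  simp only [List.mem_map, List.mem_filter, decide_eq_true_eq]
  constructor
  · rintro ⟨⟨px, py⟩, ⟨hp, h1, h2, h3⟩, rfl⟩
    simp only at h1 h2 h3 ⊢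
    subst h1
    exact ⟨hp, by omega, by omega⟩
  · rintro ⟨hmem, h1, h2⟩
    exact ⟨(sx, v), ⟨hmem, rfl, by omega, by omega⟩, rfl⟩

lemma pvMem_W (occ : List (Int × Int)) (sx sy v : Int) :
    v ∈ (occ.filter (fun p => decide (p.2 = sy ∧ 0 ≤ p.1 ∧ p.1 < sx))).map Prod.fst ↔
      ((v, sy) ∈ occ ∧ (sx - 1) - (sx.toNat : Int) < v ∧ v ≤ sx - 1) := by
  simp only [List.mem_map, List.mem_filter, decide_eq_true_eq]
  constructor
  · rintro ⟨⟨px, py⟩, ⟨hp, h1, h2, h3⟩, rfl⟩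
    simp only at h1 h2 h3 ⊢
    subst h1
    exact ⟨hp, by omega, by omega⟩
  · rintro ⟨hmem, h1, h2⟩
    exact ⟨(v, sy), ⟨hmem, rfl, by omega, by omega⟩, rfl⟩

-- A's scan of a full positions list equals the previous-free-cell walk from nothing.
lemma pvScanA_full (occ P : List (Int × Int)) :
    pvScanA occ P (PySem.List.enumerate P) = pvWalkL occ P none := by
  have h := pvScanA_eq_walkL occ P []
  simpa using h

-- ===== VERDICT (by name: the statement is the Claim_ definition above) =====
theorem get_spore_position_in_direction_spec : Claim_equal_get_spore_position_in_direction := by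
  intro direction sp occ w h _ hpre
  unfold Spec_get_spore_position_in_direction
  rcases hpre with hd | hd | hd | hd <;> subst hd <;>
    simp only [get_spore_position_in_direction, get_spore_position_in_direction_alt,
      String.reduceEq, if_true, if_false] <;>
    rw [pvScanA_full]
  · -- N : decreasing vertical ray from sy - 1, sy.toNat cells
    rw [PySem.List.pyRange_neg_one, List.map_map]
    have hn : (sp.2 - 1 - (-1)).toNat = sp.2.toNat := by omega
    rw [show ((fun y => (sp.1, y)) ∘ fun k : Nat => sp.2 - 1 - (k : Int))
          = fun k : Nat => ((fun v => (sp.1, v)) ((sp.2 - 1) - (k : Int))) from rfl, hn]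
    rw [pvWalk_dec occ (fun v => (sp.1, v)) sp.2.toNat (sp.2 - 1) none _
      (fun v => pvMem_N occ sp.1 sp.2 v)]
    cases hm : ((occ.filter (fun p => decide (p.1 = sp.1 ∧ 0 ≤ p.2 ∧ p.2 < sp.2))).map Prod.snd).max? with
    | none =>
      simp only
      by_cases h0 : sp.2.toNat = 0
      · rw [if_pos h0, if_neg (by omega)]
      · rw [if_neg h0, if_pos (by omega)]
        congr 2
        omega
    | some v0 =>
      simp only
      by_cases hlt : v0 < sp.2 - 1
      · rw [if_pos hlt, if_pos (by omega)]
      · rw [if_neg hlt, if_neg (by omega)]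
  · -- S : increasing vertical ray from sy + 1, (h - (sy+1)).toNat cells
    rw [PySem.List.pyRange_one, List.map_map]
    rw [show ((fun y => (sp.1, y)) ∘ fun k : Nat => sp.2 + 1 + (k : Int))
          = fun k : Nat => ((fun v => (sp.1, v)) ((sp.2 + 1) + (k : Int))) from rfl]
    rw [pvWalk_inc occ (fun v => (sp.1, v)) (h - (sp.2 + 1)).toNat (sp.2 + 1) none _
      (fun v => pvMem_S occ sp.1 sp.2 h v)]
    cases hm : ((occ.filter (fun p => decide (p.1 = sp.1 ∧ sp.2 < p.2 ∧ p.2 < h))).map Prod.snd).min? with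
    | none =>
      simp only
      by_cases h0 : (h - (sp.2 + 1)).toNat = 0
      · rw [if_pos h0, if_neg (by omega)]
      · rw [if_neg h0, if_pos (by omega)]
        congr 2
        omega
    | some v0 =>
      simp only
  · -- E : increasing horizontal ray from sx + 1, (w - (sx+1)).toNat cells
    rw [PySem.List.pyRange_one, List.map_map]
    rw [show ((fun x => (x, sp.2)) ∘ fun k : Nat => sp.1 + 1 + (k : Int))
          = fun k : Nat => ((fun v => (v, sp.2)) ((sp.1 + 1) + (k : Int))) from rfl]
    rw [pvWalk_inc occ (fun v => (v, sp.2)) (w - (sp.1 + 1)).toNat (sp.1 + 1) none _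
      (fun v => pvMem_E occ sp.1 sp.2 w v)]
    cases hm : ((occ.filter (fun p => decide (p.2 = sp.2 ∧ sp.1 < p.1 ∧ p.1 < w))).map Prod.fst).min? with
    | none =>
      simp only
      by_cases h0 : (w - (sp.1 + 1)).toNat = 0
      · rw [if_pos h0, if_neg (by omega)]
      · rw [if_neg h0, if_pos (by omega)]
        congr 2
        omega
    | some v0 =>
      simp only
  · -- W : decreasing horizontal ray from sx - 1, sx.toNat cells
    rw [PySem.List.pyRange_neg_one, List.map_map]
    have hn : (sp.1 - 1 - (-1)).toNat = sp.1.toNat := by omega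
    rw [show ((fun x => (x, sp.2)) ∘ fun k : Nat => sp.1 - 1 - (k : Int))
          = fun k : Nat => ((fun v => (v, sp.2)) ((sp.1 - 1) - (k : Int))) from rfl, hn]
    rw [pvWalk_dec occ (fun v => (v, sp.2)) sp.1.toNat (sp.1 - 1) none _
      (fun v => pvMem_W occ sp.1 sp.2 v)]
    cases hm : ((occ.filter (fun p => decide (p.2 = sp.2 ∧ 0 ≤ p.1 ∧ p.1 < sp.1))).map Prod.fst).max? with
    | none =>
      simp only
      by_cases h0 : sp.1.toNat = 0
      · rw [if_pos h0, if_neg (by omega)]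
      · rw [if_neg h0, if_pos (by omega)]
        congr 2
        omega
    | some v0 =>
      simp only
      by_cases hlt : v0 < sp.1 - 1
      · rw [if_pos hlt, if_pos (by omega)]
      · rw [if_neg hlt, if_neg (by omega)]
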